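-- pv_equiv track=rewrite | github.com/koychevo/python_HackBulgaria | Programming0-1/week7/inner_trim.py | inner_trim
-- ===== SOURCE A (Python) =====
-- def left_trim(string):
--     trimmed_string = ""
--     start_index = 0
--     for i in range(len(string)):
--         if string[i] == " ":
--             start_index += 1
--         else:
--             break
--     if start_index > 0:
--         for i in range(start_index, len(string)):
--             trimmed_string += string[i]
--     else:
--         trimmed_string = string
--     return trimmed_string
--
-- def right_trim(string):
--     trimmed_string = ""
--     last_index = len(string) - 1
--     for i in range(len(string) - 1, -1, -1):
--         if string[i] == " ":
--             last_index -= 1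
--         else:
--             break
--     if last_index < len(string) - 1:
--         for i in range(last_index + 1):
--             trimmed_string += string[i]
--     else:
--         trimmed_string = string
--     return trimmed_string
--
-- def inner_trim(string):
--     trimmed_string = ""
--     string = left_trim(right_trim(string))
--     is_char_space = False
--     for index in range(len(string)):
--         if ord(string[index]) == 32 and not is_char_space:
--             trimmed_string += string[index]
--             is_char_space = True
--         elif ord(string[index]) != 32:
--             trimmed_string += string[index]
--             is_char_space = False
--
--     string = right_trim(left_trim(string))
--     return trimmed_string
-- ===== SOURCE B (Python) =====
-- def inner_trim(string):
--     return " ".join(filter(None, string.split(" ")))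
-- ===== Notes on version B (the rewrite author's own statement) =====
-- stated objective: idiomatic
-- what changed: Replaced the hand-written left/right trim helpers and the per-character boolean state-machine scan with a tokenize-then-join: split on the single-space delimiter, drop empty segments, rejoin with one space; the C-level split/join and the single join-allocation replace A's per-character Python-level loop and repeated string concatenation (constant-factor speedup, measured).
import Mathlib
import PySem

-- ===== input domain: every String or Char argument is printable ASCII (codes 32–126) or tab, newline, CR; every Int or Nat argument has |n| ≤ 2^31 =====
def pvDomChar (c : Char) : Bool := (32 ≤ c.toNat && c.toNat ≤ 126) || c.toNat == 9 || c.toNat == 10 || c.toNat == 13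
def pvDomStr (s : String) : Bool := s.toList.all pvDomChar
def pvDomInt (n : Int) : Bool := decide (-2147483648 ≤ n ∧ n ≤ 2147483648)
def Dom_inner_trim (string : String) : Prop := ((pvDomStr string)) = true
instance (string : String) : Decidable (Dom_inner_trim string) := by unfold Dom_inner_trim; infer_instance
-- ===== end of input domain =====

-- B replaces A's hand-written trim helpers and boolean state-machine scan by split-on-space / drop-empties / join (idiomatic).

-- ===== PORT A =====
-- left_trim's first loop: count leading spaces, stopping at the first non-space (the `break`)
def countLead : List Char → Nat
  | [] => 0
  | c :: cs => if c = ' ' then countLead cs + 1 else 0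

-- left_trim: if start_index > 0, the copy loop appends string[start_index..len-1] in order, i.e. the suffix s.drop start_index
def leftTrimL (s : List Char) : List Char :=
  if countLead s > 0 then s.drop (countLead s) else s

-- right_trim's loop scans indices len-1, len-2, …, i.e. the reversed list, counting trailing spaces until the break
def countTrail (s : List Char) : Nat := countLead s.reverse

-- right_trim: last_index = len-1-k; if k > 0 the copy loop builds string[0..last_index], i.e. s.take (len-k)
def rightTrimL (s : List Char) : List Char :=
  if countTrail s > 0 then s.take (s.length - countTrail s) else s

-- inner_trim's scan: the pair (trimmed_string, is_char_space) updated per character, branches in A's order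
def collapseStep (p : List Char × Bool) (c : Char) : List Char × Bool :=
  if c = ' ' ∧ p.2 = false then (p.1 ++ [c], true)
  else if c ≠ ' ' then (p.1 ++ [c], false)
  else p

def inner_trim (string : String) : String :=
  -- A's final reassignment `string = right_trim(left_trim(string))` is dead code: trimmed_string is returned
  String.ofList ((leftTrimL (rightTrimL string.toList)).foldl collapseStep ([], false)).1

-- ===== PORT B =====
-- string.split(" "): the first piece and the remaining pieces, built structurally from the left end of the char list
def splitSp : List Char → List Char × List (List Char)
  | [] => ([], [])
  | c :: cs =>
    if c = ' ' then ([], (splitSp cs).1 :: (splitSp cs).2)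
    else (c :: (splitSp cs).1, (splitSp cs).2)

def inner_trim_alt (string : String) : String :=
  -- filter(None, …) drops the empty segments; " ".join = intercalate [' ']
  String.ofList (List.intercalate [' ']
    (((splitSp string.toList).1 :: (splitSp string.toList).2).filter (fun t => !t.isEmpty)))

-- ===== PRECONDITION & SPEC =====
def Spec_inner_trim (string : String) (out : String) : Prop := out = inner_trim_alt string
instance (string : String) (out : String) : Decidable (Spec_inner_trim string out) := by unfold Spec_inner_trim; infer_instance

-- ===== CLAIM (what is proved, stated in full; the proofs are below) =====
def Claim_equal_inner_trim : Prop := ∀ (string : String), Dom_inner_trim string → Spec_inner_trim string (inner_trim string)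

-- ===== LEMMAS AND PROOFS =====

-- tokens of a char list: the non-empty pieces of splitSp
def toks (l : List Char) : List (List Char) :=
  ((splitSp l).1 :: (splitSp l).2).filter (fun t => !t.isEmpty)

def J (l : List Char) : List Char := List.intercalate [' '] (toks l)

-- the collapse scan as a structural recursion
def collapse : Bool → List Char → List Char
  | _, [] => []
  | b, c :: cs =>
    if c = ' ' then (if b then collapse true cs else ' ' :: collapse true cs)
    else c :: collapse false cs

theorem getLast?_cons_ne (c : Char) (cs : List Char) (h : cs ≠ []) :
    (c :: cs).getLast? = cs.getLast? := by
  cases cs with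
  | nil => exact absurd rfl h
  | cons d ds => simp [List.getLast?_cons_cons]

theorem foldl_collapseStep (l : List Char) (acc : List Char) (b : Bool) :
    (l.foldl collapseStep (acc, b)).1 = acc ++ collapse b l := by
  induction l generalizing acc b with
  | nil => simp [collapse]
  | cons c cs ih =>
    by_cases hc : c = ' '
    · cases b with
      | false => simp [collapseStep, hc, collapse, ih]
      | true => simp [collapseStep, hc, collapse, ih]
    · simp [collapseStep, hc, collapse, ih]

theorem drop_countLead (l : List Char) : l.drop (countLead l) = l.dropWhile (fun c => c == ' ') := by
  induction l with
  | nil => rfl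
  | cons c cs ih =>
    by_cases hc : c = ' '
    · simp [countLead, hc, List.dropWhile, ih]
    · simp [countLead, hc, List.dropWhile_cons_of_neg]

theorem leftTrimL_eq (l : List Char) : leftTrimL l = l.dropWhile (fun c => c == ' ') := by
  unfold leftTrimL
  split
  · exact drop_countLead l
  · have h0 : countLead l = 0 := by omega
    have := drop_countLead l
    rw [h0] at this
    simpa using this

theorem countLead_le_length (l : List Char) : countLead l ≤ l.length := by
  induction l with
  | nil => simp [countLead]
  | cons c cs ih =>
    by_cases hc : c = ' ' <;> simp [countLead, hc]
    omega

theorem rightTrimL_eq (l : List Char) :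
    rightTrimL l = (l.reverse.dropWhile (fun c => c == ' ')).reverse := by
  unfold rightTrimL countTrail
  have hle := countLead_le_length l.reverse
  have key : l.take (l.length - countLead l.reverse)
      = (l.reverse.dropWhile (fun c => c == ' ')).reverse := by
    rw [← drop_countLead]
    rw [List.reverse_drop]
    congr 1 <;> simp
  split
  · exact key
  · have h0 : countLead l.reverse = 0 := by omega
    have := key
    rw [h0] at this
    simpa using this

theorem splitSp_append_space (l : List Char) :
    splitSp (l ++ [' ']) = ((splitSp l).1, (splitSp l).2 ++ [[]]) := by
  induction l with
  | nil => rfl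
  | cons c cs ih =>
    by_cases hc : c = ' ' <;> simp [splitSp, hc, ih]

theorem toks_cons_space (cs : List Char) : toks (' ' :: cs) = toks cs := by
  simp [toks, splitSp]

theorem toks_append_space (l : List Char) : toks (l ++ [' ']) = toks l := by
  simp [toks, splitSp_append_space, List.filter_cons, List.filter_append]

theorem toks_append_replicate (l : List Char) (n : Nat) :
    toks (l ++ List.replicate n ' ') = toks l := by
  induction n generalizing l with
  | zero => simp
  | succ n ih =>
    have : l ++ List.replicate (n + 1) ' ' = (l ++ [' ']) ++ List.replicate n ' ' := by
      simp [List.replicate_succ]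
    rw [this, ih, toks_append_space]

theorem toks_dropWhile (l : List Char) : toks (l.dropWhile (fun c => c == ' ')) = toks l := by
  induction l with
  | nil => rfl
  | cons c cs ih =>
    by_cases hc : c = ' '
    · rw [hc, List.dropWhile_cons_of_pos (by simp)]
      rw [ih, toks_cons_space]
    · rw [List.dropWhile_cons_of_neg (by simp [hc])]

theorem takeWhile_space_eq_replicate (l : List Char) :
    l.takeWhile (fun c => c == ' ') = List.replicate (l.takeWhile (fun c => c == ' ')).length ' ' := by
  induction l with
  | nil => rfl
  | cons c cs ih =>
    by_cases hc : c = ' '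
    · rw [hc, List.takeWhile_cons_of_pos (by simp)]
      simp [List.replicate_succ]
      exact ih
    · rw [List.takeWhile_cons_of_neg (by simp [hc])]
      rfl

theorem toks_rightTrim (l : List Char) : toks (rightTrimL l) = toks l := by
  rw [rightTrimL_eq]
  conv_rhs => rw [show l = ((l.reverse.takeWhile (fun c => c == ' ')) ++ (l.reverse.dropWhile (fun c => c == ' '))).reverse by simp]
  rw [List.reverse_append]
  rw [takeWhile_space_eq_replicate l.reverse, List.reverse_replicate]
  rw [toks_append_replicate]

theorem inter_cons (s y : List Char) (L : List (List Char)) :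
    List.intercalate s (y :: L) = y ++ if L = [] then [] else s ++ List.intercalate s L := by
  cases L with
  | nil => simp [List.intercalate]
  | cons z zs => simp [List.intercalate, List.intersperse]

theorem toks_eq_nil_iff (l : List Char) : toks l = [] ↔ ∀ c ∈ l, c = ' ' := by
  induction l with
  | nil => simp [toks, splitSp]
  | cons c cs ih =>
    by_cases hc : c = ' '
    · subst hc
      rw [toks_cons_space, ih]
      simp
    · constructor
      · intro h
        exfalso
        simp [toks, splitSp, hc, List.filter] at h
      · intro h
        exact absurd (h c (by simp)) hc

theorem getLast?_all_space : ∀ (l : List Char), l ≠ [] → (∀ c ∈ l, c = ' ') → l.getLast? = some ' '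
  | [c], _, h => by simp [h c (by simp)]
  | c :: d :: ds, _, h => by
    rw [List.getLast?_cons_cons]
    exact getLast?_all_space (d :: ds) (by simp) (fun x hx => h x (by simp [hx]))

-- the joint characterisation of the collapse scan on inputs without a trailing space
theorem collapse_eq_J (l : List Char) (hNT : l.getLast? ≠ some ' ') :
    collapse true l = J l ∧
      collapse false l = if l.head? = some ' ' then ' ' :: J l else J l := by
  induction l with
  | nil => simp [collapse, J, toks, splitSp, List.intercalate]
  | cons c cs ih =>
    by_cases hc : c = ' '
    · subst hc
      have hcs : cs ≠ [] := by
        intro h; subst h; simp at hNT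
      have hNTcs : cs.getLast? ≠ some ' ' := by
        rwa [getLast?_cons_ne _ _ hcs] at hNT
      obtain ⟨h1, _⟩ := ih hNTcs
      constructor
      · rw [show collapse true (' ' :: cs) = collapse true cs from by simp [collapse]]
        rw [h1]
        simp only [J, toks_cons_space]
      · rw [if_pos (show (' ' :: cs).head? = some ' ' from rfl)]
        rw [show collapse false (' ' :: cs) = ' ' :: collapse true cs from by simp [collapse]]
        rw [h1]
        simp only [J, toks_cons_space]
    · have hcol : ∀ b, collapse b (c :: cs) = c :: collapse false cs := by
        intro b; simp [collapse, hc]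
      have hJ : J (c :: cs) = c :: (if cs.head? = some ' ' then ' ' :: J cs else J cs) ∨ cs = [] := by
        cases cs with
        | nil => right; rfl
        | cons c' cs' =>
          left
          by_cases hc' : c' = ' '
          · subst hc'
            have hcs_ne : (' ' :: cs') ≠ ([] : List Char) := by simp
            have hNTcs : (' ' :: cs').getLast? ≠ some ' ' := by
              rwa [getLast?_cons_ne _ _ hcs_ne] at hNT
            have htoks : toks (' ' :: cs') ≠ [] := by
              intro hnil
              have hall := (toks_eq_nil_iff (' ' :: cs')).mp hnil
              exact hNTcs (getLast?_all_space _ hcs_ne hall)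
            have hsp : toks (c :: ' ' :: cs') = [c] :: toks (' ' :: cs') := by
              simp [toks, splitSp, hc]
            rw [J, hsp, inter_cons]
            rw [if_neg htoks]
            rw [if_pos (show (' ' :: cs').head? = some ' ' from rfl)]
            simp [J]
          · have hsp1 : (splitSp (c :: c' :: cs')) = (c :: c' :: (splitSp cs').1, (splitSp cs').2) := by
              simp [splitSp, hc, hc']
            have hsp2 : (splitSp (c' :: cs')) = (c' :: (splitSp cs').1, (splitSp cs').2) := by
              simp [splitSp, hc']
            have ht1 : toks (c :: c' :: cs')
                = (c :: c' :: (splitSp cs').1) :: ((splitSp cs').2.filter (fun t => !t.isEmpty)) := by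
              simp [toks, hsp1]
            have ht2 : toks (c' :: cs')
                = (c' :: (splitSp cs').1) :: ((splitSp cs').2.filter (fun t => !t.isEmpty)) := by
              simp [toks, hsp2]
            rw [if_neg (show ¬ (c' :: cs').head? = some ' ' by simp [hc'])]
            rw [J, ht1, inter_cons]
            rw [J, ht2, inter_cons]
            simp
      rcases hJ with hJ | hnil
      · have hNTcs : cs.getLast? ≠ some ' ' := by
          cases cs with
          | nil => simp
          | cons d ds => rwa [getLast?_cons_ne _ _ (by simp)] at hNT
        obtain ⟨_, h2⟩ := ih hNTcs
        refine ⟨?_, ?_⟩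
        · rw [hcol, h2, ← hJ]
        · rw [hcol, h2, ← hJ, if_neg (show ¬ (c :: cs).head? = some ' ' by simp [hc])]
      · subst hnil
        constructor <;>
          · rw [hcol]
            simp [collapse, J, toks, splitSp, List.intercalate, hc]

theorem head?_dropWhile_ne_space (l : List Char) :
    (l.dropWhile (fun c => c == ' ')).head? ≠ some ' ' := by
  induction l with
  | nil => simp
  | cons c cs ih =>
    by_cases hc : c = ' '
    · rw [hc, List.dropWhile_cons_of_pos (by simp)]; exact ih
    · rw [List.dropWhile_cons_of_neg (by simp [hc])]
      simp [hc]

theorem getLast?_dropWhile (l : List Char) (h : l.dropWhile (fun c => c == ' ') ≠ []) :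
    (l.dropWhile (fun c => c == ' ')).getLast? = l.getLast? := by
  obtain ⟨pre, hpre⟩ := List.dropWhile_suffix (l := l) (p := fun c => c == ' ')
  conv_rhs => rw [← hpre]
  rw [List.getLast?_append_of_ne_nil _ h]

-- ===== VERDICT (by name: the statement is the Claim_ definition above) =====
theorem inner_trim_spec : Claim_equal_inner_trim := by
  intro s _
  unfold Spec_inner_trim inner_trim inner_trim_alt
  rw [foldl_collapseStep]
  have hteq : leftTrimL (rightTrimL s.toList) = (rightTrimL s.toList).dropWhile (fun c => c == ' ') :=
    leftTrimL_eq _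
  have hNTr : (rightTrimL s.toList).getLast? ≠ some ' ' := by
    rw [rightTrimL_eq, List.getLast?_reverse]
    exact head?_dropWhile_ne_space _
  have hNTt : (leftTrimL (rightTrimL s.toList)).getLast? ≠ some ' ' := by
    rw [hteq]
    by_cases hnil : (rightTrimL s.toList).dropWhile (fun c => c == ' ') = []
    · rw [hnil]; simp
    · rw [getLast?_dropWhile _ hnil]; exact hNTr
  have hheadt : (leftTrimL (rightTrimL s.toList)).head? ≠ some ' ' := by
    rw [hteq]; exact head?_dropWhile_ne_space _
  obtain ⟨_, h2⟩ := collapse_eq_J _ hNTt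
  rw [h2, if_neg hheadt]
  have hJt : J (leftTrimL (rightTrimL s.toList)) = J s.toList := by
    rw [hteq]
    unfold J
    rw [toks_dropWhile, toks_rightTrim]
  rw [hJt]
  rfl
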